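-- pv_equiv track=rewrite | github.com/Joao-Lopes17/IA-class | TP2-Kurtan/TP2-Kurtan/genetic_algorithm.py | get_best_fitness
-- ===== SOURCE A (Python) =====
-- def get_best_fitness(pop_fit, sense):
--     if sense == 'maximize':
--         best_val = max(pop_fit)
--     elif sense == 'minimize':
--         best_val = min(pop_fit)
--     else:
--         raise ValueError("sense must be 'maximize' or 'minimize'")
--     indices = [i for i, val in enumerate(pop_fit) if val == best_val]
--     return best_val, indices
-- ===== SOURCE B (Python) =====
-- def get_best_fitness(pop_fit, sense):
--     if sense == 'maximize':
--         maximize = True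
--     elif sense == 'minimize':
--         maximize = False
--     else:
--         raise ValueError("sense must be 'maximize' or 'minimize'")
--     if not pop_fit:
--         raise ValueError("get_best_fitness() arg is an empty sequence")
--     best_val = pop_fit[0]
--     indices = [0]
--     for i in range(1, len(pop_fit)):
--         v = pop_fit[i]
--         if v == best_val:
--             indices.append(i)
--         elif (v > best_val) if maximize else (v < best_val):
--             best_val = v
--             indices = [i]
--     return best_val, indices
-- ===== Notes on version B (the rewrite author's own statement) =====
-- stated objective: alternative
-- what changed: Replaces A's two passes (built-in max/min, then an enumerate scan collecting matching indices) by a single explicit loop that maintains the running best value and its index list.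
import Mathlib
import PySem

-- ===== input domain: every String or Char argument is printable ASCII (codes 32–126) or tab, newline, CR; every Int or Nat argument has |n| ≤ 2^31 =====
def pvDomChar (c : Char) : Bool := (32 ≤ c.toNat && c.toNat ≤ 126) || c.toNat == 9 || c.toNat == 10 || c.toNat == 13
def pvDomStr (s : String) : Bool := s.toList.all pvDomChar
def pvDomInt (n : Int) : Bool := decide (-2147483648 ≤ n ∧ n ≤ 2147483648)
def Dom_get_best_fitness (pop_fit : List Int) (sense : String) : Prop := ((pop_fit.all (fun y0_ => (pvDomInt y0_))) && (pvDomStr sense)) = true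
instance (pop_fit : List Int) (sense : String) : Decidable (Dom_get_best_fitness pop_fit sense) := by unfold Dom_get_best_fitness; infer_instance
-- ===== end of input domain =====

-- B changes the decomposition (one loop maintaining best value and index list instead of
-- A's built-in max/min followed by an enumerate scan); equal return values on Pre_.

-- ===== PORT A =====
def get_best_fitness (pop_fit : List Int) (sense : String) : Int × List Int :=
  let best? : Option Int :=
    if sense = "maximize" then PySem.List.max? pop_fit (fun x => x)
    else if sense = "minimize" then PySem.List.min? pop_fit (fun x => x)
    else none  -- A raises ValueError on an invalid sense; excluded by Pre_
  match best? with
  | none => (0, [])  -- max/min raise ValueError on an empty list; excluded by Pre_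
  | some best_val =>
    (best_val, ((PySem.List.enumerate pop_fit 0).filter (fun p => p.2 == best_val)).map (fun p => p.1))

-- ===== PORT B =====
-- the for-loop of Source B: walks the elements after the first, carrying (index, best, indices)
def gbfLoop (maximize : Bool) : List Int → Int → Int → List Int → Int × List Int
  | [], _, best, idxs => (best, idxs)
  | v :: rest, i, best, idxs =>
    if v = best then gbfLoop maximize rest (i + 1) best (idxs ++ [i])
    else if (if maximize then best < v else v < best) then gbfLoop maximize rest (i + 1) v [i]
    else gbfLoop maximize rest (i + 1) best idxs

def get_best_fitness_alt (pop_fit : List Int) (sense : String) : Int × List Int :=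
  if sense = "maximize" ∨ sense = "minimize" then
    match pop_fit with
    | [] => (0, [])  -- B raises ValueError on an empty list; excluded by Pre_
    | x :: rest => gbfLoop (sense = "maximize") rest 1 x [0]
  else (0, [])  -- B raises ValueError on an invalid sense; excluded by Pre_

-- ===== PRECONDITION & SPEC =====
-- A raises ValueError when sense is neither 'maximize' nor 'minimize', and when pop_fit is
-- empty (max/min of an empty sequence); B raises there too. Pre_ excludes exactly those inputs.
def Pre_get_best_fitness (pop_fit : List Int) (sense : String) : Prop :=
  (sense = "maximize" ∨ sense = "minimize") ∧ pop_fit ≠ []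
instance (pop_fit : List Int) (sense : String) : Decidable (Pre_get_best_fitness pop_fit sense) := by
  unfold Pre_get_best_fitness; infer_instance

def pvWitness_get_best_fitness : List Int × String := ([3, 1, 3, 2], "maximize")

def Spec_get_best_fitness (pop_fit : List Int) (sense : String) (out : Int × List Int) : Prop := out = get_best_fitness_alt pop_fit sense
instance (pop_fit : List Int) (sense : String) (out : Int × List Int) : Decidable (Spec_get_best_fitness pop_fit sense out) := by unfold Spec_get_best_fitness; infer_instance

-- ===== CLAIM (what is proved, stated in full; the proofs are below) =====
def Claim_equal_get_best_fitness : Prop := ∀ (pop_fit : List Int) (sense : String), Dom_get_best_fitness pop_fit sense → Pre_get_best_fitness pop_fit sense → Spec_get_best_fitness pop_fit sense (get_best_fitness pop_fit sense)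

-- ===== LEMMAS AND PROOFS =====

def opMax (a b : Int) : Int := if a < b then b else a
def opMin (a b : Int) : Int := if b < a then b else a

-- indices (starting at i) of the elements of the list equal to M
def idxFrom (M : Int) : Int → List Int → List Int
  | _, [] => []
  | i, v :: r => if v = M then i :: idxFrom M (i + 1) r else idxFrom M (i + 1) r

theorem max?_foldl (l : List Int) (x : Int) :
    PySem.List.max? (x :: l) (fun y => y) = some (l.foldl opMax x) := by
  show List.foldl _ (some x) l = _
  induction l generalizing x with
  | nil => rfl
  | cons v r ih => simp only [List.foldl_cons, opMax]; split <;> exact ih _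

theorem min?_foldl (l : List Int) (x : Int) :
    PySem.List.min? (x :: l) (fun y => y) = some (l.foldl opMin x) := by
  show List.foldl _ (some x) l = _
  induction l generalizing x with
  | nil => rfl
  | cons v r ih => simp only [List.foldl_cons, opMin]; split <;> exact ih _

theorem filter_enumerate_eq_idxFrom (l : List Int) (s M : Int) :
    ((PySem.List.enumerate l s).filter (fun p => p.2 == M)).map (fun p => p.1) = idxFrom M s l := by
  induction l generalizing s with
  | nil => rfl
  | cons v r ih =>
    rw [PySem.List.enumerate_cons]
    by_cases h : v = M <;> simp [idxFrom, h, ih]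

theorem le_foldl_opMax (l : List Int) (b : Int) : b ≤ l.foldl opMax b := by
  induction l generalizing b with
  | nil => exact le_refl _
  | cons v r ih =>
    refine le_trans ?_ (ih (opMax b v))
    unfold opMax; split <;> omega

theorem foldl_opMin_le (l : List Int) (b : Int) : l.foldl opMin b ≤ b := by
  induction l generalizing b with
  | nil => exact le_refl _
  | cons v r ih =>
    refine le_trans (ih (opMin b v)) ?_
    unfold opMin; split <;> omega

theorem gbfLoop_spec_max (l : List Int) (i best : Int) (idxs : List Int) :
    gbfLoop true l i best idxs =
      ((l.foldl opMax best),
        (if best = l.foldl opMax best then idxs else [])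
          ++ idxFrom (l.foldl opMax best) i l) := by
  induction l generalizing i best idxs with
  | nil => simp [gbfLoop, idxFrom]
  | cons v r ih =>
    by_cases hvb : v = best
    · have hop : opMax best v = best := by unfold opMax; omega
      rw [show gbfLoop true (v :: r) i best idxs
            = gbfLoop true r (i + 1) best (idxs ++ [i]) by simp [gbfLoop, hvb]]
      rw [ih, List.foldl_cons, hop]
      by_cases hbM : best = r.foldl opMax best
      · simp only [idxFrom, if_pos hbM, if_pos (hvb.trans hbM), List.append_assoc,
          List.singleton_append]
      · simp only [idxFrom, if_neg hbM, if_neg (show ¬ v = _ by rw [hvb]; exact hbM), List.nil_append]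
    · by_cases hlt : best < v
      · have hop : opMax best v = v := by unfold opMax; omega
        rw [show gbfLoop true (v :: r) i best idxs
              = gbfLoop true r (i + 1) v [i] by simp [gbfLoop, hvb, hlt]]
        rw [ih, List.foldl_cons, hop]
        have hvM := le_foldl_opMax r v
        have hbM : ¬ best = r.foldl opMax v := by omega
        by_cases hv : v = r.foldl opMax v
        · simp only [idxFrom, if_pos hv, if_neg hbM, List.singleton_append,
            List.nil_append]
        · simp only [idxFrom, if_neg hv, if_neg hbM, List.nil_append]
      · have hop : opMax best v = best := by unfold opMax; omega
        rw [show gbfLoop true (v :: r) i best idxs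
              = gbfLoop true r (i + 1) best idxs by simp [gbfLoop, hvb, hlt]]
        rw [ih, List.foldl_cons, hop]
        have hbM := le_foldl_opMax r best
        have hvM : ¬ v = r.foldl opMax best := by omega
        simp only [idxFrom, if_neg hvM]

theorem gbfLoop_spec_min (l : List Int) (i best : Int) (idxs : List Int) :
    gbfLoop false l i best idxs =
      ((l.foldl opMin best),
        (if best = l.foldl opMin best then idxs else [])
          ++ idxFrom (l.foldl opMin best) i l) := by
  induction l generalizing i best idxs with
  | nil => simp [gbfLoop, idxFrom]
  | cons v r ih =>
    by_cases hvb : v = best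
    · have hop : opMin best v = best := by unfold opMin; omega
      rw [show gbfLoop false (v :: r) i best idxs
            = gbfLoop false r (i + 1) best (idxs ++ [i]) by simp [gbfLoop, hvb]]
      rw [ih, List.foldl_cons, hop]
      by_cases hbM : best = r.foldl opMin best
      · simp only [idxFrom, if_pos hbM, if_pos (hvb.trans hbM), List.append_assoc,
          List.singleton_append]
      · simp only [idxFrom, if_neg hbM, if_neg (show ¬ v = _ by rw [hvb]; exact hbM), List.nil_append]
    · by_cases hlt : v < best
      · have hop : opMin best v = v := by unfold opMin; omega
        rw [show gbfLoop false (v :: r) i best idxs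
              = gbfLoop false r (i + 1) v [i] by simp [gbfLoop, hvb, hlt]]
        rw [ih, List.foldl_cons, hop]
        have hvM := foldl_opMin_le r v
        have hbM : ¬ best = r.foldl opMin v := by omega
        by_cases hv : v = r.foldl opMin v
        · simp only [idxFrom, if_pos hv, if_neg hbM, List.singleton_append,
            List.nil_append]
        · simp only [idxFrom, if_neg hv, if_neg hbM, List.nil_append]
      · have hop : opMin best v = best := by unfold opMin; omega
        rw [show gbfLoop false (v :: r) i best idxs
              = gbfLoop false r (i + 1) best idxs by simp [gbfLoop, hvb, hlt]]
        rw [ih, List.foldl_cons, hop]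
        have hbM := foldl_opMin_le r best
        have hvM : ¬ v = r.foldl opMin best := by omega
        simp only [idxFrom, if_neg hvM]

-- ===== VERDICT (by name: the statement is the Claim_ definition above) =====
theorem get_best_fitness_spec : Claim_equal_get_best_fitness := by
  intro pop_fit sense _ hpre
  obtain ⟨hsense, hne⟩ := hpre
  obtain ⟨x, rest, rfl⟩ : ∃ x rest, pop_fit = x :: rest := by
    cases pop_fit with
    | nil => exact absurd rfl hne
    | cons x rest => exact ⟨x, rest, rfl⟩
  show get_best_fitness _ _ = get_best_fitness_alt _ _
  cases hsense with
  | inl h =>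
    subst h
    rw [show get_best_fitness (x :: rest) "maximize"
          = ((rest.foldl opMax x),
              ((PySem.List.enumerate (x :: rest) 0).filter
                (fun p => p.2 == rest.foldl opMax x)).map (fun p => p.1)) by
        unfold get_best_fitness; rw [if_pos rfl, max?_foldl]]
    rw [filter_enumerate_eq_idxFrom]
    rw [show get_best_fitness_alt (x :: rest) "maximize"
          = gbfLoop true rest 1 x [0] by
        unfold get_best_fitness_alt; rw [if_pos (Or.inl rfl)]; simp]
    rw [gbfLoop_spec_max]
    by_cases hx : x = rest.foldl opMax x
    · simp only [idxFrom, if_pos hx, List.singleton_append]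
      norm_num
    · simp only [idxFrom, if_neg hx, List.nil_append]
      norm_num
  | inr h =>
    subst h
    rw [show get_best_fitness (x :: rest) "minimize"
          = ((rest.foldl opMin x),
              ((PySem.List.enumerate (x :: rest) 0).filter
                (fun p => p.2 == rest.foldl opMin x)).map (fun p => p.1)) by
        unfold get_best_fitness
        rw [if_neg (by decide), if_pos rfl, min?_foldl]]
    rw [filter_enumerate_eq_idxFrom]
    rw [show get_best_fitness_alt (x :: rest) "minimize"
          = gbfLoop false rest 1 x [0] by
        unfold get_best_fitness_alt; rw [if_pos (Or.inr rfl)]; simp]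
    rw [gbfLoop_spec_min]
    by_cases hx : x = rest.foldl opMin x
    · simp only [idxFrom, if_pos hx, List.singleton_append]
      norm_num
    · simp only [idxFrom, if_neg hx, List.nil_append]
      norm_num
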